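-- pv_equiv track=rewrite | github.com/diane-defores/contentglowz | agents/seo/tools/research_tools.py | _analyze_title_patterns
-- ===== SOURCE A (Python) =====
-- from typing import List, Dict, Any, Optional
--
-- def _analyze_title_patterns(titles: List[str]) -> List[str]:
--     """Analyze common patterns in titles."""
--     patterns = []
--
--     # Check for common structures
--     if any("how to" in title.lower() for title in titles):
--         patterns.append("How-to format common")
--
--     if any(any(char.isdigit() for char in title) for title in titles):
--         patterns.append("Numbered lists/statistics present")
--
--     if any("best" in title.lower() or "top" in title.lower() for title in titles):
--         patterns.append("Superlative rankings common")
--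
--     if any("guide" in title.lower() for title in titles):
--         patterns.append("Comprehensive guides favored")
--
--     if not patterns:
--         patterns.append("Standard informational titles")
--
--     return patterns
-- ===== SOURCE B (Python) =====
-- from typing import List
--
-- def _analyze_title_patterns(titles: List[str]) -> List[str]:
--     """Analyze common patterns in titles (single pass over titles)."""
--     howto = digits = superlative = guide = False
--     for title in titles:
--         lowered = title.lower()
--         howto = howto or "how to" in lowered
--         digits = digits or any(c.isdigit() for c in title)
--         superlative = superlative or ("best" in lowered or "top" in lowered)
--         guide = guide or "guide" in lowered
--     patterns = []
--     if howto:
--         patterns.append("How-to format common")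
--     if digits:
--         patterns.append("Numbered lists/statistics present")
--     if superlative:
--         patterns.append("Superlative rankings common")
--     if guide:
--         patterns.append("Comprehensive guides favored")
--     return patterns or ["Standard informational titles"]
-- ===== Notes on version B (the rewrite author's own statement) =====
-- stated objective: alternative
-- what changed: B replaces A's four separate any()-scans over the title list (each lowering every title again) by one pass that lowers each title once and maintains four boolean flags, building the label list afterwards.
import Mathlib
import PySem

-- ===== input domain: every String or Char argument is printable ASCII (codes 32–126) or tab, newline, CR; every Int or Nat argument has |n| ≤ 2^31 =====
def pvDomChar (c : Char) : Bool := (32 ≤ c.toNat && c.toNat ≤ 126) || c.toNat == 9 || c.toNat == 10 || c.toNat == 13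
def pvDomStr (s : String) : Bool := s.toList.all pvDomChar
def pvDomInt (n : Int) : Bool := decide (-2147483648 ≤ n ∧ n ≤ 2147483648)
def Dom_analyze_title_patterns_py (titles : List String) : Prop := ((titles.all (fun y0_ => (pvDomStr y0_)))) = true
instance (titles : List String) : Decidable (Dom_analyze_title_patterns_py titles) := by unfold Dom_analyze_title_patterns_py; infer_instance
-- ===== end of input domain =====

-- B makes one pass over the titles maintaining four boolean flags (lowering each title once) instead of A's four separate any()-scans; same labels, same order.

-- ===== PORT A =====
def analyze_title_patterns_py (titles : List String) : List String :=
  let patterns : List String := []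
  let patterns := if titles.any (fun title => PySem.Str.isIn "how to" (PySem.Str.lower title))
    then patterns ++ ["How-to format common"] else patterns
  let patterns := if titles.any (fun title => title.toList.any (fun c => PySem.Chars.isdigit c))
    then patterns ++ ["Numbered lists/statistics present"] else patterns
  let patterns := if titles.any (fun title =>
      PySem.Str.isIn "best" (PySem.Str.lower title) || PySem.Str.isIn "top" (PySem.Str.lower title))
    then patterns ++ ["Superlative rankings common"] else patterns
  let patterns := if titles.any (fun title => PySem.Str.isIn "guide" (PySem.Str.lower title))
    then patterns ++ ["Comprehensive guides favored"] else patterns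
  if patterns = [] then ["Standard informational titles"] else patterns

-- ===== PORT B =====
-- one step of B's loop: update the four flags from one title
def pvAltStep (f : Bool × Bool × Bool × Bool) (title : String) : Bool × Bool × Bool × Bool :=
  let lowered := PySem.Str.lower title
  (f.1 || PySem.Str.isIn "how to" lowered,
   f.2.1 || title.toList.any (fun c => PySem.Chars.isdigit c),
   f.2.2.1 || (PySem.Str.isIn "best" lowered || PySem.Str.isIn "top" lowered),
   f.2.2.2 || PySem.Str.isIn "guide" lowered)

def analyze_title_patterns_py_alt (titles : List String) : List String :=
  let f := titles.foldl pvAltStep (false, false, false, false)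
  let patterns : List String :=
    (if f.1 then ["How-to format common"] else []) ++
    (if f.2.1 then ["Numbered lists/statistics present"] else []) ++
    (if f.2.2.1 then ["Superlative rankings common"] else []) ++
    (if f.2.2.2 then ["Comprehensive guides favored"] else [])
  if patterns = [] then ["Standard informational titles"] else patterns

-- ===== PRECONDITION & SPEC =====
def Spec_analyze_title_patterns_py (titles : List String) (out : List String) : Prop := out = analyze_title_patterns_py_alt titles
instance (titles : List String) (out : List String) : Decidable (Spec_analyze_title_patterns_py titles out) := by unfold Spec_analyze_title_patterns_py; infer_instance

-- ===== CLAIM (what is proved, stated in full; the proofs are below) =====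
def Claim_equal_analyze_title_patterns_py : Prop := ∀ (titles : List String), Dom_analyze_title_patterns_py titles → Spec_analyze_title_patterns_py titles (analyze_title_patterns_py titles)

-- ===== LEMMAS AND PROOFS =====

-- B's single fold computes the four any-scans A performs
theorem pvAltStep_fold (titles : List String) (a b c d : Bool) :
    titles.foldl pvAltStep (a, b, c, d) =
      (a || titles.any (fun title => PySem.Str.isIn "how to" (PySem.Str.lower title)),
       b || titles.any (fun title => title.toList.any (fun ch => PySem.Chars.isdigit ch)),
       c || titles.any (fun title =>
          PySem.Str.isIn "best" (PySem.Str.lower title) || PySem.Str.isIn "top" (PySem.Str.lower title)),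
       d || titles.any (fun title => PySem.Str.isIn "guide" (PySem.Str.lower title))) := by
  induction titles generalizing a b c d with
  | nil => simp
  | cons t rest ih =>
    simp only [List.foldl_cons, List.any_cons, pvAltStep, ih]
    simp [Bool.or_assoc]

theorem analyze_title_patterns_py_spec : Claim_equal_analyze_title_patterns_py := by
  intro titles _
  show analyze_title_patterns_py titles = analyze_title_patterns_py_alt titles
  unfold analyze_title_patterns_py analyze_title_patterns_py_alt
  rw [pvAltStep_fold]
  cases h1 : titles.any (fun title => PySem.Str.isIn "how to" (PySem.Str.lower title)) <;>
  cases h2 : titles.any (fun title => title.toList.any (fun ch => PySem.Chars.isdigit ch)) <;>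
  cases h3 : titles.any (fun title =>
      PySem.Str.isIn "best" (PySem.Str.lower title) || PySem.Str.isIn "top" (PySem.Str.lower title)) <;>
  cases h4 : titles.any (fun title => PySem.Str.isIn "guide" (PySem.Str.lower title)) <;>
  simp
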